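-- pv_equiv track=rewrite | github.com/lazyCodes7/DSA | 30-Days-Of-DSA/Day13/sort-stack.py | insertSortedStack
-- ===== SOURCE A (Python) =====
-- def insertSortedStack(stack, element):
-- 	if(stack == [] or element>=stack[-1]):
-- 		stack.append(element)
--
-- 	else:
-- 		removed = stack.pop()
-- 		insertSortedStack(stack,element)
-- 		stack.append(removed)
--
-- 	return stack
-- ===== SOURCE B (Python) =====
-- def insertSortedStack(stack, element):
--     temp = []
--     while stack and stack[-1] > element:
--         temp.append(stack.pop())
--     stack.append(element)
--     while temp:
--         stack.append(temp.pop())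
--     return stack
-- ===== Notes on version B (the rewrite author's own statement) =====
-- stated objective: alternative
-- what changed: Replaces A's recursion (pop, recurse, re-append on unwind) with an explicit iterative auxiliary stack: pop larger elements onto temp, append the element, then pop temp back; same mutation and return value without recursion depth.
import Mathlib
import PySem

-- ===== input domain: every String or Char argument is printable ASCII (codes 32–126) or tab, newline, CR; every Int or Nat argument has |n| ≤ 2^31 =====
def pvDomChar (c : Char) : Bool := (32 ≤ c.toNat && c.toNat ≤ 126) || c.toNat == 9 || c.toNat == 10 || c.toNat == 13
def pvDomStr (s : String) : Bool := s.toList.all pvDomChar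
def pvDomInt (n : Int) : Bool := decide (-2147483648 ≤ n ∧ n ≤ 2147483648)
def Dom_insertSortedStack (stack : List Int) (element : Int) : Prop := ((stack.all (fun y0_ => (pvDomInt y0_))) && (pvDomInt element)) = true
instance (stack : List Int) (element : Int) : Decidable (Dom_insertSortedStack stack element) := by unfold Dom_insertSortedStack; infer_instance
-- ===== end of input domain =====

-- B replaces A's recursion with an explicit iterative auxiliary stack (same return value;
-- both Pythons mutate `stack` in place to the same final contents).

-- ===== PORT A =====
-- recursive: if empty or element >= last, append; else pop the last, recurse, append it back
def insertSortedStack (stack : List Int) (element : Int) : List Int :=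
  match h : stack.getLast? with
  | none => stack ++ [element]
  | some last =>
    if element ≥ last then stack ++ [element]
    else insertSortedStack stack.dropLast element ++ [last]
termination_by stack.length
decreasing_by
  have hne : stack ≠ [] := by intro hn; simp [hn] at h
  have := List.length_pos_of_ne_nil hne
  simp [List.length_dropLast]
  omega

-- ===== PORT B =====
-- while stack and stack[-1] > element: temp.append(stack.pop())
def altPop (stack temp : List Int) (element : Int) : List Int × List Int :=
  match h : stack.getLast? with
  | none => (stack, temp)
  | some last =>
    if last > element then altPop stack.dropLast (temp ++ [last]) element
    else (stack, temp)
termination_by stack.length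
decreasing_by
  have hne : stack ≠ [] := by intro hn; simp [hn] at h
  have := List.length_pos_of_ne_nil hne
  simp [List.length_dropLast]
  omega

-- while temp: stack.append(temp.pop())
def pushBack (stack temp : List Int) : List Int :=
  match h : temp.getLast? with
  | none => stack
  | some last => pushBack (stack ++ [last]) temp.dropLast
termination_by temp.length
decreasing_by
  have hne : temp ≠ [] := by intro hn; simp [hn] at h
  have := List.length_pos_of_ne_nil hne
  simp [List.length_dropLast]
  omega

def insertSortedStack_alt (stack : List Int) (element : Int) : List Int :=
  let p := altPop stack [] element
  pushBack (p.1 ++ [element]) p.2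

-- ===== PRECONDITION & SPEC =====
def Spec_insertSortedStack (stack : List Int) (element : Int) (out : List Int) : Prop := out = insertSortedStack_alt stack element
instance (stack : List Int) (element : Int) (out : List Int) : Decidable (Spec_insertSortedStack stack element out) := by unfold Spec_insertSortedStack; infer_instance

-- ===== CLAIM (what is proved, stated in full; the proofs are below) =====
def Claim_equal_insertSortedStack : Prop := ∀ (stack : List Int) (element : Int), Dom_insertSortedStack stack element → Spec_insertSortedStack stack element (insertSortedStack stack element)

-- ===== LEMMAS AND PROOFS =====

-- pushBack appends temp in pop (reversed) order
theorem pushBack_eq (temp stack : List Int) : pushBack stack temp = stack ++ temp.reverse := by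
  induction temp using List.reverseRecOn generalizing stack with
  | nil => rw [pushBack.eq_def]; simp
  | append_singleton t last ih =>
    rw [pushBack.eq_def]
    split
    · simp_all
    · rename_i last' h
      rw [List.getLast?_concat] at h
      cases h
      simp [ih]

-- the popped-out elements of B, re-appended in reverse, reconstruct A's result
theorem altPop_eq (n : Nat) (stack temp : List Int) (element : Int) (hn : stack.length ≤ n) :
    (altPop stack temp element).1 ++ [element] ++ (altPop stack temp element).2.reverse
      = insertSortedStack stack element ++ temp.reverse := by
  induction n generalizing stack temp with
  | zero =>
    have : stack = [] := by
      cases stack with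
      | nil => rfl
      | cons a l => simp at hn
    subst this
    rw [altPop.eq_def, insertSortedStack.eq_def]
    simp
  | succ n ih =>
    rw [altPop.eq_def, insertSortedStack.eq_def]
    cases h : stack.getLast? with
    | none => simp
    | some last =>
      by_cases hgt : last > element
      · have hge : ¬ element ≥ last := by omega
        simp only [hgt, if_true, hge, if_false]
        have hne : stack ≠ [] := by intro hn'; simp [hn'] at h
        have hlen : stack.dropLast.length ≤ n := by
          have := List.length_pos_of_ne_nil hne
          simp [List.length_dropLast]; omega
        rw [ih stack.dropLast (temp ++ [last]) hlen]
        simp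
      · have hge : element ≥ last := by omega
        simp [hgt, hge]

theorem alt_eq (stack : List Int) (element : Int) :
    insertSortedStack_alt stack element = insertSortedStack stack element := by
  unfold insertSortedStack_alt
  rw [pushBack_eq]
  have := altPop_eq stack.length stack [] element (le_refl _)
  simpa using this

-- ===== VERDICT (by name: the statement is the Claim_ definition above) =====
theorem insertSortedStack_spec : Claim_equal_insertSortedStack := by
  intro stack element _
  unfold Spec_insertSortedStack
  exact (alt_eq stack element).symm
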